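-- pv_equiv track=rewrite | github.com/EmreCibikci/2d_3d_asset_scrapper | scrapers/pixabay_scraper.py | _determine_image_category
-- ===== SOURCE A (Python) =====
-- from typing import List, Dict, Optional
--
-- def _determine_image_category(title: str, tags: List[str]) -> str:
--     """Determine image category based on title and tags"""
--     title_lower = title.lower()
--     tags_text = ' '.join(tags).lower()
--     combined_text = f"{title_lower} {tags_text}"
--
--     if any(word in combined_text for word in ['background', 'landscape', 'sky', 'forest', 'castle']):
--         return 'environment'
--     elif any(word in combined_text for word in ['texture', 'pattern', 'material', 'surface']):
--         return 'texture'
--     elif any(word in combined_text for word in ['character', 'person', 'creature', 'monster']):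
--         return 'character'
--     elif any(word in combined_text for word in ['ui', 'interface', 'button', 'icon']):
--         return 'ui'
--     else:
--         return 'other'
-- ===== SOURCE B (Python) =====
-- _GROUPS = (
--     ('environment', ('background', 'landscape', 'sky', 'forest', 'castle')),
--     ('texture', ('texture', 'pattern', 'material', 'surface')),
--     ('character', ('character', 'person', 'creature', 'monster')),
--     ('ui', ('ui', 'interface', 'button', 'icon')),
-- )
--
-- def _determine_image_category(title, tags):
--     """Position-driven multi-pattern scan: walk the combined text left to right once,
--     dispatching on the current character through a first-character index to flag every
--     category with a keyword starting here, then return the highest-priority flagged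
--     category."""
--     combined = f"{title.lower()} {' '.join(tags).lower()}"
--     index = {}
--     for g, (_cat, kws) in enumerate(_GROUPS):
--         for w in kws:
--             index.setdefault(w[0], []).append((w, g))
--     hit = [False, False, False, False]
--     for i, ch in enumerate(combined):
--         for w, g in index.get(ch, ()):
--             if not hit[g] and combined.startswith(w, i):
--                 hit[g] = True
--     for g, (cat, _kws) in enumerate(_GROUPS):
--         if hit[g]:
--             return cat
--     return 'other'
-- ===== Notes on version B (the rewrite author's own statement) =====
-- stated objective: alternative
-- what changed: Replaced A's keyword-driven if/elif chain (each branch scanning the whole text per keyword) with a position-driven multi-pattern scan: one left-to-right walk over the combined text dispatches each position through a first-character keyword index and flags matching categories, then a priority pick over the flags.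
import Mathlib
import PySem

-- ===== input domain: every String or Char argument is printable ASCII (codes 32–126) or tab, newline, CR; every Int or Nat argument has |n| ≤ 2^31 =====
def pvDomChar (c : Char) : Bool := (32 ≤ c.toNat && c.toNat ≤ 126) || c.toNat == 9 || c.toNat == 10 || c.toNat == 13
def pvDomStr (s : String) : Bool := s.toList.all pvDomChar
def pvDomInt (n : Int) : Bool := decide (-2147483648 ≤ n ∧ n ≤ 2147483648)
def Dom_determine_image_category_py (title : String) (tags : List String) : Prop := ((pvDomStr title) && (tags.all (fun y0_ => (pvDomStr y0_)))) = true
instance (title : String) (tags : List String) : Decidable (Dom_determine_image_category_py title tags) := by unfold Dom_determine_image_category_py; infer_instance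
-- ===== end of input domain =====

-- B replaces A's keyword-driven if/elif chain with a position-driven single pass over
-- the combined text: a first-character index dispatches each position to its candidate
-- keywords, flagging categories; a priority pick over the flags follows (alternative
-- traversal of the same cost class).


-- ===== PORT A =====
def determine_image_category_py (title : String) (tags : List String) : String :=
  let title_lower := PySem.Str.lower title
  let tags_text := PySem.Str.lower (PySem.Str.join " " tags)
  let combined_text := title_lower ++ " " ++ tags_text
  if ["background", "landscape", "sky", "forest", "castle"].any
      (fun word => PySem.Str.isIn word combined_text) then "environment"
  else if ["texture", "pattern", "material", "surface"].any
      (fun word => PySem.Str.isIn word combined_text) then "texture"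
  else if ["character", "person", "creature", "monster"].any
      (fun word => PySem.Str.isIn word combined_text) then "character"
  else if ["ui", "interface", "button", "icon"].any
      (fun word => PySem.Str.isIn word combined_text) then "ui"
  else "other"

-- ===== PORT B =====
def pvEnvKws : List String := ["background", "landscape", "sky", "forest", "castle"]
def pvTexKws : List String := ["texture", "pattern", "material", "surface"]
def pvChaKws : List String := ["character", "person", "creature", "monster"]
def pvUiKws  : List String := ["ui", "interface", "button", "icon"]

-- first-character dispatch + combined.startswith(w, i): only keywords whose first
-- character is the current one are tried (Source B's index.get(ch) candidate set)
def pvStartsHere (kws : List String) (ch : Char) (suf : List Char) : Bool :=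
  kws.any (fun w => w.toList.head? == some ch && w.toList.isPrefixOf suf)

-- the single left-to-right walk over the text, carrying the four category flags
def pvScan : List Char → Bool → Bool → Bool → Bool → Bool × Bool × Bool × Bool
  | [], e, t, c, u => (e, t, c, u)
  | ch :: rest, e, t, c, u =>
      pvScan rest (e || pvStartsHere pvEnvKws ch (ch :: rest))
                  (t || pvStartsHere pvTexKws ch (ch :: rest))
                  (c || pvStartsHere pvChaKws ch (ch :: rest))
                  (u || pvStartsHere pvUiKws ch (ch :: rest))

def determine_image_category_py_alt (title : String) (tags : List String) : String :=
  let combined := PySem.Str.lower title ++ " " ++ PySem.Str.lower (PySem.Str.join " " tags)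
  match pvScan combined.toList false false false false with
  | (e, t, c, u) =>
      if e then "environment"
      else if t then "texture"
      else if c then "character"
      else if u then "ui"
      else "other"

-- ===== PRECONDITION & SPEC =====
def Spec_determine_image_category_py (title : String) (tags : List String) (out : String) : Prop := out = determine_image_category_py_alt title tags
instance (title : String) (tags : List String) (out : String) : Decidable (Spec_determine_image_category_py title tags out) := by unfold Spec_determine_image_category_py; infer_instance

-- ===== CLAIM (what is proved, stated in full; the proofs are below) =====
def Claim_equal_determine_image_category_py : Prop := ∀ (title : String) (tags : List String), Dom_determine_image_category_py title tags → Spec_determine_image_category_py title tags (determine_image_category_py title tags)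

-- ===== LEMMAS AND PROOFS =====

-- proof-only: does keyword w start at some position of l?
def pvAnyPos (w : List Char) : List Char → Bool
  | [] => false
  | ch :: rest => w.isPrefixOf (ch :: rest) || pvAnyPos w rest

-- proof-only: suffix-first formulation of a group flag
def pvGroupHit (kws : List String) : List Char → Bool
  | [] => false
  | ch :: rest => pvStartsHere kws ch (ch :: rest) || pvGroupHit kws rest

lemma pvScan_eq (l : List Char) (e t c u : Bool) :
    pvScan l e t c u =
      (e || pvGroupHit pvEnvKws l, t || pvGroupHit pvTexKws l,
       c || pvGroupHit pvChaKws l, u || pvGroupHit pvUiKws l) := by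
  induction l generalizing e t c u with
  | nil => simp [pvScan, pvGroupHit]
  | cons ch rest ih =>
      simp [pvScan, pvGroupHit, ih, Bool.or_assoc]

lemma pvAny_or {α : Type} (l : List α) (f g : α → Bool) :
    (l.any f || l.any g) = l.any (fun x => f x || g x) := by
  induction l with
  | nil => simp
  | cons x xs ih =>
      simp only [List.any_cons, ← ih]
      cases f x <;> cases g x <;> cases xs.any f <;> cases xs.any g <;> rfl

lemma pvAny_congr_mem {α : Type} (l : List α) (f g : α → Bool)
    (h : ∀ x ∈ l, f x = g x) : l.any f = l.any g := by
  induction l with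
  | nil => rfl
  | cons x xs ih =>
      simp only [List.any_cons, h x (by simp), ih (fun y hy => h y (by simp [hy]))]

-- the first-character dispatch filter is redundant for a nonempty keyword
lemma pvHead_filter (w : List Char) (hw : w ≠ []) (ch : Char) (rest : List Char) :
    (w.head? == some ch && w.isPrefixOf (ch :: rest)) = w.isPrefixOf (ch :: rest) := by
  cases w with
  | nil => exact absurd rfl hw
  | cons a as =>
      simp only [List.head?_cons, List.isPrefixOf]
      cases h : (a == ch) <;> simp_all

lemma pvGroupHit_eq_any (kws : List String) (hk : ∀ w ∈ kws, w.toList ≠ [])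
    (l : List Char) :
    pvGroupHit kws l = kws.any (fun w => pvAnyPos w.toList l) := by
  induction l with
  | nil => simp [pvGroupHit, pvAnyPos]
  | cons ch rest ih =>
      simp only [pvGroupHit, pvAnyPos, ih, pvStartsHere, pvAny_or]
      exact pvAny_congr_mem _ _ _
        (fun w hw => by rw [pvHead_filter w.toList (hk w hw) ch rest])

lemma pvAnyPos_true_iff (w : List Char) (hw : w ≠ []) (l : List Char) :
    pvAnyPos w l = true ↔ ∃ j, w <+: l.drop j := by
  induction l with
  | nil =>
      simp only [pvAnyPos, List.drop_nil]
      constructor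
      · intro h; exact absurd h (by simp)
      · rintro ⟨j, hj⟩
        exact absurd (List.prefix_nil.mp hj) hw
  | cons ch rest ih =>
      simp only [pvAnyPos, Bool.or_eq_true, List.isPrefixOf_iff_prefix, ih]
      constructor
      · rintro (h | ⟨j, hj⟩)
        · exact ⟨0, by simpa using h⟩
        · exact ⟨j + 1, by simpa using hj⟩
      · rintro ⟨j, hj⟩
        cases j with
        | zero => exact Or.inl (by simpa using hj)
        | succ k => exact Or.inr ⟨k, by simpa using hj⟩

lemma pvAnyPos_eq_isIn (w : String) (hw : w.toList ≠ []) (l : List Char) :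
    pvAnyPos w.toList l = PySem.Chars.isIn w.toList l := by
  rw [Bool.eq_iff_iff, pvAnyPos_true_iff _ hw]
  exact PySem.Chars.exists_prefix_drop_iff_isIn _ _

lemma pvGroupHit_eq_isIn (kws : List String) (l : List Char)
    (hk : ∀ w ∈ kws, w.toList ≠ []) :
    pvGroupHit kws l = kws.any (fun w => PySem.Chars.isIn w.toList l) := by
  rw [pvGroupHit_eq_any kws hk]
  exact pvAny_congr_mem _ _ _ (fun w hw => pvAnyPos_eq_isIn w (hk w hw) l)

-- ===== VERDICT (by name: the statement is the Claim_ definition above) =====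
theorem determine_image_category_py_spec : Claim_equal_determine_image_category_py := by
  intro title tags _
  unfold Spec_determine_image_category_py determine_image_category_py determine_image_category_py_alt
  simp only [pvScan_eq, Bool.false_or]
  rw [pvGroupHit_eq_isIn pvEnvKws _ (by decide),
      pvGroupHit_eq_isIn pvTexKws _ (by decide),
      pvGroupHit_eq_isIn pvChaKws _ (by decide),
      pvGroupHit_eq_isIn pvUiKws _ (by decide)]
  simp [pvEnvKws, pvTexKws, pvChaKws, pvUiKws, PySem.Str.isIn_eq]
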